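-- pv_equiv track=rewrite | github.com/OnyX0000/coding_test | Python3/프로그래머스/1/388351. 유연근무제/유연근무제.py | solution
-- ===== SOURCE A (Python) =====
-- def convertTime(n) :
--     # 입력된 정수 n을 시간과 분으로 해석하여 분 단위로 변환
--     # 예: 1013 → 10시 13분 → 10*60 + 13 = 613분
--     h = n // 100
--     m = n % 100
--     return h * 60 + m
--
-- def solution(schedules, timelogs, startday) :
--     answer = 0
--
--     # 각 직원의 출근 기록을 확인
--     for i in range(len(schedules)) :
--         s = startday  # 현재 요일 (1:월요일, 2:화요일, ..., 7:일요일)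
--         schedule = convertTime(schedules[i])  # 직원 i의 희망 출근 시간 (분 단위)
--
--         # 일주일(7일) 동안의 출근 기록을 순서대로 검사
--         for time in timelogs[i] :
--             # 토요일(6)과 일요일(7)은 이벤트에 영향을 주지 않으므로 건너뛴다.
--             if s in [6, 7] :
--                 s += 1  # 다음 요일로 이동
--                 if s == 8 :  # 요일이 8이면 일요일을 넘어서 월요일(1)로 변경
--                     s = 1
--                 continue
--
--             t = convertTime(time)  # 실제 출근 시간을 분 단위로 변환
--
--             # 만약 실제 출근 시간이 지각이면
--             # 해당 직원은 상품 대상에서 제외되므로 반복문을 종료한다.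
--             if schedule + 10 < t :
--                 break
--             else :
--                 s += 1  # 다음 근무일로 이동
--         else :
--             # for-else: 반복문이 break 없이 정상 종료되면,
--             # 모든 유효 근무일(월~금)에 제시간 출근한 것으로 간주하여 당첨
--             answer += 1
--
--     return answer
-- ===== SOURCE B (Python) =====
-- def convertTime(n):
--     return n // 100 * 60 + n % 100
--
-- def solution(schedules, timelogs, startday):
--     # Day-major elimination: walk the calendar column by column, dropping
--     # employees who are late on a working day; the survivors win.
--     n = len(schedules)
--     limits = [convertTime(schedules[i]) + 10 for i in range(n)]
--     rows = [timelogs[i] for i in range(n)]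
--     survivors = list(range(n))
--     width = max((len(r) for r in rows), default=0)
--     day = startday
--     for j in range(width):
--         if day != 6 and day != 7:
--             survivors = [i for i in survivors
--                          if j >= len(rows[i]) or convertTime(rows[i][j]) <= limits[i]]
--         day = 1 if day == 7 else day + 1
--     return len(survivors)
-- ===== Notes on version B (the rewrite author's own statement) =====
-- stated objective: alternative
-- what changed: Replaces A's employee-major row scan with break/for-else and a running day counter by a day-major elimination: iterate over calendar columns, filtering a shrinking list of surviving employee indices each working day, and return its final length.
import Mathlib
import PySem

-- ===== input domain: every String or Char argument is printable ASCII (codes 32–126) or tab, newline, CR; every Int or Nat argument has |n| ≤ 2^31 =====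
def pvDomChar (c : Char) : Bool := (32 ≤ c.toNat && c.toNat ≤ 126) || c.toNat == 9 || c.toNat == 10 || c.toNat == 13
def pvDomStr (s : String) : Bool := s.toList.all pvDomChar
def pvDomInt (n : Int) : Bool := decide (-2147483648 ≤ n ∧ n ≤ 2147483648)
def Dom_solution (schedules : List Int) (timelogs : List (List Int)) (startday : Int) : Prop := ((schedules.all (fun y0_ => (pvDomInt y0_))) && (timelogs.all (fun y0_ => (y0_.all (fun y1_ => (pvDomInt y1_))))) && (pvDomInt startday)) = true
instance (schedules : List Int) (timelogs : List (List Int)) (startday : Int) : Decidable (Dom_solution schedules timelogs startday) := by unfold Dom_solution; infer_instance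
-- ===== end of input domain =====

-- B replaces A's employee-major row scan (running day counter, break / for-else)
-- by a day-major elimination over calendar columns on a shrinking survivor list;
-- same complexity, a different traversal. Return values only (no mutation).

-- ===== PORT A =====
def convertTime (n : Int) : Int :=
  PySem.Int.floordiv n 100 * 60 + PySem.Int.mod n 100

-- inner 'for time in timelogs[i] … else' loop of A: true iff the loop finishes
-- without break (the for-else branch fires); s is the running weekday counter
def innerA (schedule : Int) : List Int → Int → Bool
  | [], _ => true
  | time :: rest, s =>
    if s = 6 ∨ s = 7 then
      innerA schedule rest (if s + 1 = 8 then 1 else s + 1)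
    else
      if schedule + 10 < convertTime time then false
      else innerA schedule rest (s + 1)

def solution (schedules : List Int) (timelogs : List (List Int)) (startday : Int) : Int :=
  (List.range schedules.length).foldl
    (fun (answer : Int) (i : Nat) =>
      match PySem.List.pyGet? timelogs (i : Int) with
      | none => answer  -- Python raises IndexError here; Pre_solution excludes it
      | some logs =>
        answer + (if innerA (convertTime (PySem.List.pyGetD schedules (i : Int) 0)) logs startday then 1 else 0))
    0

-- ===== PORT B =====
-- `day = 1 if day == 7 else day + 1`
def nextDay (d : Int) : Int := if d = 7 then 1 else d + 1

-- `j >= len(rows[i]) or convertTime(rows[i][j]) <= limits[i]`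
-- (i comes from the survivor list and j < len(rows[i]) on the second disjunct,
--  so the getD/pyGetD defaults are never hit)
def keepCol (rows : List (List Int)) (limits : List Int) (j : Nat) (i : Nat) : Bool :=
  decide ((rows.getD i []).length ≤ j) ||
  decide (convertTime (PySem.List.pyGetD (rows.getD i []) (j : Int) 0) ≤ limits.getD i 0)

-- `for j in range(width): …` of Source B, as structural recursion over the index list
def loopB (rows : List (List Int)) (limits : List Int) :
    List Nat → List Nat → Int → List Nat
  | [], survivors, _ => survivors
  | j :: js, survivors, day =>
    loopB rows limits js
      (if day ≠ 6 ∧ day ≠ 7 then survivors.filter (keepCol rows limits j) else survivors)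
      (nextDay day)

def solution_alt (schedules : List Int) (timelogs : List (List Int)) (startday : Int) : Int :=
  let n := schedules.length
  let limits := (List.range n).map (fun (i : Nat) => convertTime (PySem.List.pyGetD schedules (i : Int) 0) + 10)
  let rows := (List.range n).map (fun (i : Nat) => PySem.List.pyGetD timelogs (i : Int) [])
  -- max((len(r) for r in rows), default=0): lengths are Nats, so foldl max 0 is exact
  let width := rows.foldl (fun a r => Nat.max a r.length) 0
  ((loopB rows limits (List.range width) (List.range n) startday).length : Int)

-- ===== PRECONDITION & SPEC =====
-- Pre_ excludes exactly the inputs where A raises IndexError: timelogs shorter than schedules (B raises there too).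
def Pre_solution (schedules : List Int) (timelogs : List (List Int)) (startday : Int) : Prop :=
  schedules.length ≤ timelogs.length
instance (schedules : List Int) (timelogs : List (List Int)) (startday : Int) : Decidable (Pre_solution schedules timelogs startday) := by unfold Pre_solution; infer_instance

def pvWitness_solution : List Int × List (List Int) × Int :=
  ([900, 1000], [[900, 905, 910, 850, 900, 2300, 0], [1011, 1000, 999, 1000, 1000, 1000, 1000]], 3)

def Spec_solution (schedules : List Int) (timelogs : List (List Int)) (startday : Int) (out : Int) : Prop := out = solution_alt schedules timelogs startday
instance (schedules : List Int) (timelogs : List (List Int)) (startday : Int) (out : Int) : Decidable (Spec_solution schedules timelogs startday out) := by unfold Spec_solution; infer_instance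

-- ===== CLAIM =====
def Claim_equal_solution : Prop := ∀ (schedules : List Int) (timelogs : List (List Int)) (startday : Int), Dom_solution schedules timelogs startday → Pre_solution schedules timelogs startday → Spec_solution schedules timelogs startday (solution schedules timelogs startday)

-- ===== LEMMAS AND PROOFS =====

-- the weekday on column j, for proofs only
def dayAt (sd : Int) : Nat → Int
  | 0 => sd
  | j + 1 => nextDay (dayAt sd j)

theorem innerA_iff (sc sd : Int) : ∀ (logs : List Int) (k : Nat),
    (innerA sc logs (dayAt sd k) = true ↔
      ∀ jn, jn < logs.length → ¬(dayAt sd (k + jn) = 6 ∨ dayAt sd (k + jn) = 7) →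
        convertTime (logs.getD jn 0) ≤ sc + 10) := by
  intro logs
  induction logs with
  | nil => intro k; simp [innerA]
  | cons t rest ih =>
    intro k
    by_cases hW : dayAt sd k = 6 ∨ dayAt sd k = 7
    · have hstep : (if dayAt sd k + 1 = 8 then (1:Int) else dayAt sd k + 1) = dayAt sd (k + 1) := by
        show _ = nextDay (dayAt sd k)
        unfold nextDay
        rcases hW with h | h <;> simp [h]
      rw [show innerA sc (t :: rest) (dayAt sd k) =
            innerA sc rest (dayAt sd (k+1)) by
          simp only [innerA, hW, if_pos]; rw [hstep]]
      rw [ih (k + 1)]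
      constructor
      · intro h jn hjn hwd
        cases jn with
        | zero => simp only [Nat.add_zero] at hwd; exact absurd hW hwd
        | succ m =>
          have := h m (by simpa using hjn) (by rw [show k + 1 + m = k + (m+1) by omega]; exact hwd)
          simpa using this
      · intro h jn hjn hwd
        have := h (jn + 1) (by simpa using hjn)
          (by rw [show k + (jn + 1) = k + 1 + jn by omega]; exact hwd)
        simpa using this
    · have hstep : dayAt sd k + 1 = dayAt sd (k + 1) := by
        show _ = nextDay (dayAt sd k)
        unfold nextDay
        have h7 : dayAt sd k ≠ 7 := by rw [not_or] at hW; exact hW.2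
        simp [h7]
      by_cases hl : sc + 10 < convertTime t
      · rw [show innerA sc (t :: rest) (dayAt sd k) = false by
            simp only [innerA, hW, if_neg, not_false_iff, hl, if_pos]]
        simp only [Bool.false_eq_true, false_iff]
        intro h
        have := h 0 (by simp) hW
        simp only [List.getD_cons_zero] at this
        omega
      · rw [show innerA sc (t :: rest) (dayAt sd k) =
              innerA sc rest (dayAt sd (k+1)) by
            simp only [innerA, hW, if_neg, not_false_iff, hl]; rw [hstep]]
        rw [ih (k + 1)]
        constructor
        · intro h jn hjn hwd
          cases jn with
          | zero => simp only [List.getD_cons_zero]; omega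
          | succ m =>
            have := h m (by simpa using hjn) (by rw [show k + 1 + m = k + (m+1) by omega]; exact hwd)
            simpa using this
        · intro h jn hjn hwd
          have := h (jn + 1) (by simpa using hjn)
            (by rw [show k + (jn + 1) = k + 1 + jn by omega]; exact hwd)
          simpa using this

-- the accumulated per-employee predicate of B's column loop
def colsOK (rows : List (List Int)) (limits : List Int) : List Nat → Int → Nat → Bool
  | [], _, _ => true
  | j :: js, d, i =>
    (if d ≠ 6 ∧ d ≠ 7 then keepCol rows limits j i else true) &&
      colsOK rows limits js (nextDay d) i

theorem loopB_eq_filter (rows : List (List Int)) (limits : List Int) :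
    ∀ (js : List Nat) (survivors : List Nat) (d : Int),
      loopB rows limits js survivors d = survivors.filter (colsOK rows limits js d) := by
  intro js
  induction js with
  | nil => intro s d; simp [loopB, colsOK]
  | cons j js ih =>
    intro s d
    by_cases hd : d ≠ 6 ∧ d ≠ 7
    · rw [show loopB rows limits (j :: js) s d =
            loopB rows limits js (s.filter (keepCol rows limits j)) (nextDay d) by
          simp [loopB, hd]]
      rw [ih, List.filter_filter]
      apply List.filter_congr
      intro x _
      simp [colsOK, hd, Bool.and_comm]
    · rw [show loopB rows limits (j :: js) s d = loopB rows limits js s (nextDay d) by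
          simp [loopB, hd]]
      rw [ih]
      apply List.filter_congr
      intro x _
      simp [colsOK, hd]

theorem colsOK_iff (rows : List (List Int)) (limits : List Int) (sd : Int) (i : Nat) :
    ∀ (m k : Nat),
      (colsOK rows limits (List.range' k m) (dayAt sd k) i = true ↔
        ∀ j, k ≤ j → j < k + m → ¬(dayAt sd j = 6 ∨ dayAt sd j = 7) →
          keepCol rows limits j i = true) := by
  intro m
  induction m with
  | zero => intro k; simp [colsOK]; intro j h1 h2; omega
  | succ m ih =>
    intro k
    rw [List.range'_succ]
    show ((if dayAt sd k ≠ 6 ∧ dayAt sd k ≠ 7 then keepCol rows limits k i else true) &&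
      colsOK rows limits (List.range' (k+1) m) (nextDay (dayAt sd k)) i) = true ↔ _
    rw [Bool.and_eq_true, show nextDay (dayAt sd k) = dayAt sd (k+1) from rfl, ih (k+1)]
    constructor
    · intro ⟨h1, h2⟩ j hj1 hj2 hwd
      rcases Nat.eq_or_lt_of_le hj1 with rfl | hlt
      · rw [not_or] at hwd; simpa [hwd.1, hwd.2] using h1
      · exact h2 j hlt (by omega) hwd
    · intro h
      constructor
      · by_cases hwd : dayAt sd k ≠ 6 ∧ dayAt sd k ≠ 7
        · simpa [hwd] using h k le_rfl (by omega) (by tauto)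
        · simp [hwd]
      · intro j hj1 hj2 hwd
        exact h j (by omega) (by omega) hwd

theorem length_filter_eq_foldl (p : Nat → Bool) :
    ∀ (l : List Nat) (a : Int),
      l.foldl (fun acc i => acc + if p i then 1 else 0) a = a + ((l.filter p).length : Int) := by
  intro l
  induction l with
  | nil => intro a; simp
  | cons x xs ih =>
    intro a
    by_cases hx : p x = true
    · simp [hx, ih]; ring
    · simp [hx, ih]

-- ===== VERDICT =====
theorem solution_spec : Claim_equal_solution := by
  intro schedules timelogs startday _hdom hpre
  unfold Spec_solution solution
  unfold Pre_solution at hpre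
  set n := schedules.length with hn
  set limits := (List.range n).map (fun (i : Nat) => convertTime (PySem.List.pyGetD schedules (i : Int) 0) + 10) with hlim
  set rows := (List.range n).map (fun (i : Nat) => PySem.List.pyGetD timelogs (i : Int) []) with hrows
  set width := rows.foldl (fun a r => Nat.max a r.length) 0 with hw
  -- length of each row is ≤ width
  have hrowlen : ∀ i, i < n → (rows.getD i []).length ≤ width := by
    intro i hi
    have hil : i < rows.length := by simp [hrows, hi]
    have hmem : rows.getD i [] ∈ rows := by
      rw [List.getD_eq_getElem _ _ hil]; exact List.getElem_mem hil
    exact (PySem.List.le_foldl_max_nat rows (fun r => r.length) 0).2 _ hmem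
  have hrget : ∀ i, i < n → rows.getD i [] = timelogs.getD i [] := by
    intro i hi
    rw [hrows, PySem.List.getD_map_range _ n i _ hi]
    simp
  have hlget : ∀ i, i < n → limits.getD i 0 = convertTime (schedules.getD i 0) + 10 := by
    intro i hi
    rw [hlim]
    have := PySem.List.getD_map_range
      (fun (i : Nat) => convertTime (PySem.List.pyGetD schedules (i : Int) 0) + 10) n i 0 hi
    rw [this]
    simp
  -- the per-employee predicates agree on range n
  have hpred : ∀ i ∈ List.range n,
      (if innerA (convertTime (PySem.List.pyGetD schedules (i : Int) 0)) (timelogs.getD i []) startday then (1:Int) else 0)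
        = (if colsOK rows limits (List.range width) startday i then 1 else 0) := by
    intro i hi
    rw [List.mem_range] at hi
    have hb : innerA (convertTime (PySem.List.pyGetD schedules (i : Int) 0)) (timelogs.getD i []) startday
        = colsOK rows limits (List.range width) startday i := by
      rw [Bool.eq_iff_iff]
      rw [show startday = dayAt startday 0 from rfl]
      rw [innerA_iff]
      rw [List.range_eq_range', colsOK_iff]
      simp only [Nat.zero_add]
      constructor
      · intro h j _ hj2 hwd
        unfold keepCol
        by_cases hr : (rows.getD i []).length ≤ j
        · simp only [Bool.or_eq_true, decide_eq_true_eq]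
          left; exact hr
        · have hjr : j < (timelogs.getD i []).length := by rw [← hrget i hi]; omega
          have := h j hjr hwd
          simp only [Bool.or_eq_true, decide_eq_true_eq]
          right
          rw [hrget i hi, hlget i hi, PySem.List.pyGetD_natCast]
          have hs : PySem.List.pyGetD schedules (i : Int) 0 = schedules.getD i 0 := by
            simp
          rw [← hs]
          simpa using this
      · intro h jn hjn hwd
        have hjw : jn < width := by
          have := hrowlen i hi; rw [hrget i hi] at this; omega
        have := h jn (by omega) hjw hwd
        unfold keepCol at this
        simp only [Bool.or_eq_true, decide_eq_true_eq] at this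
        rcases this with hlen | hok
        · rw [hrget i hi] at hlen; omega
        · rw [hrget i hi, hlget i hi, PySem.List.pyGetD_natCast] at hok
          have hs : PySem.List.pyGetD schedules (i : Int) 0 = schedules.getD i 0 := by
            simp
          rw [← hs] at hok
          simpa using hok
    rw [hb]
  -- B unfolds to the filter length
  have halt : solution_alt schedules timelogs startday
      = (((List.range n).filter (colsOK rows limits (List.range width) startday)).length : Int) := by
    show ((loopB rows limits (List.range width) (List.range n) startday).length : Int) = _
    rw [loopB_eq_filter]
  -- A's fold: resolve pyGet?, then turn the bit-sum into a filter length
  rw [PySem.List.foldl_congr_mem _ _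
      (fun (answer : Int) (i : Nat) =>
        answer + (if colsOK rows limits (List.range width) startday i then 1 else 0))]
  · rw [length_filter_eq_foldl, zero_add, halt]
  · intro acc i hi
    have hin : i ∈ List.range n := hi
    rw [List.mem_range] at hi
    have hit : i < timelogs.length := by omega
    have h1 : PySem.List.pyGet? timelogs (i : Int) = some (timelogs.getD i []) := by
      rw [PySem.List.pyGet?_natCast, List.getElem?_eq_getElem hit, List.getD_eq_getElem _ _ hit]
    rw [h1]
    show acc + (if innerA (convertTime (PySem.List.pyGetD schedules (i : Int) 0)) (timelogs.getD i []) startday then (1:Int) else 0) = _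
    rw [hpred i hin]
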